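-- pv_equiv track=rewrite | github.com/maximilianq/adventOfCode2021 | day06/day06b.py | child
-- ===== SOURCE A (Python) =====
-- def child(data):
--     output = {}
--     for key in data.keys():
--         if key == 0:
--             if 7 in output:
--                 output[7] = output[7] + data[key]
--             else:
--                 output[7] = data[key]
--             if 9 in output:
--                 output[9] += data[key]
--             else:
--                 output[9] = data[key]
--         else:
--             if key in output.keys():
--                 output[key] = output[key] + data[key]
--             else:
--                 output[key] = data[key]
--     return output
-- ===== SOURCE B (Python) =====
-- def child(data):
--     # Two-phase: first determine the output key order, then compute each key's
--     # value by direct lookups (no running accumulator dict).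
--     def targets(key):
--         return (7, 9) if key == 0 else (key,)
--
--     order = []
--     seen = set()
--     for key in data:
--         for t in targets(key):
--             if t not in seen:
--                 seen.add(t)
--                 order.append(t)
--
--     zero = data.get(0, 0)
--     return {t: data.get(t, 0) + (zero if t in (7, 9) else 0) for t in order}
-- ===== Notes on version B (the rewrite author's own statement) =====
-- stated objective: alternative
-- what changed: A interleaves copy-through and zero-redistribution in one loop that branches on containment over a running accumulator dict; B has no accumulator: it first computes the output key order (first occurrences of each key's target keys) and then builds each value by direct lookups, the key's own count plus the count of key zero when the key is seven or nine.
import Mathlib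
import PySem

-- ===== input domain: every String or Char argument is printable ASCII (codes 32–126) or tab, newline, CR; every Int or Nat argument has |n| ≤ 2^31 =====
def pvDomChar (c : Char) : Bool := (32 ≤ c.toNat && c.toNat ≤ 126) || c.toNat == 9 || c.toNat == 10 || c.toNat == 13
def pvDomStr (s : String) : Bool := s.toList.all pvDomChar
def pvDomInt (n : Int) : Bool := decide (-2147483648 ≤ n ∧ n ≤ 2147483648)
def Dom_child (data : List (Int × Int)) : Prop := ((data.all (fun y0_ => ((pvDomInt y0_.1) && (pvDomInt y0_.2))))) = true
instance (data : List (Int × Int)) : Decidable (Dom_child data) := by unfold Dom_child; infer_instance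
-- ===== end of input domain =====

-- B separates the computation of the output key order from the per-key totals; A keeps one
-- running dict with per-key contains-branching.  Same return value everywhere (alternative).

-- ===== PORT A =====
-- The Python parameter is a dict; its assoc-list argument is read as PySem.Dict.ofList data.
-- data[key] is ported as getD key 0: key ranges over d.keys, so the lookup never raises.
def child (data : List (Int × Int)) : List (Int × Int) :=
  let d := PySem.Dict.ofList data
  (d.keys.foldl (fun (out : PySem.Dict Int Int) key =>
    if key = 0 then
      let out := if out.contains 7 then out.insert 7 (out.getD 7 0 + d.getD key 0)
                 else out.insert 7 (d.getD key 0)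
      if out.contains 9 then out.insert 9 (out.getD 9 0 + d.getD key 0)
      else out.insert 9 (d.getD key 0)
    else
      if out.contains key then out.insert key (out.getD key 0 + d.getD key 0)
      else out.insert key (d.getD key 0)) PySem.Dict.empty).items

-- ===== PORT B =====
-- targets(key) from Source B
def pvTargets (key : Int) : List Int := if key = 0 then [7, 9] else [key]

def child_alt (data : List (Int × Int)) : List (Int × Int) :=
  let d := PySem.Dict.ofList data
  let os := d.keys.foldl (fun (os : List Int × PySem.Set Int) key =>
    (pvTargets key).foldl (fun (os : List Int × PySem.Set Int) t =>
      if os.2.contains t then os else (os.1 ++ [t], PySem.Set.add os.2 t)) os)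
    ([], PySem.Set.empty)
  let zero := d.getD 0 0
  os.1.map (fun t => (t, d.getD t 0 + (if t = 7 ∨ t = 9 then zero else 0)))

-- ===== PRECONDITION & SPEC =====
def Spec_child (data : List (Int × Int)) (out : List (Int × Int)) : Prop := out = child_alt data
instance (data : List (Int × Int)) (out : List (Int × Int)) : Decidable (Spec_child data out) := by unfold Spec_child; infer_instance

-- ===== CLAIM (what is proved, stated in full; the proofs are below) =====
def Claim_equal_child : Prop := ∀ (data : List (Int × Int)), Dom_child data → Spec_child data (child data)

-- ===== LEMMAS AND PROOFS =====

-- the generic "insert key (old + v)" grouping step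
def pvGStep (o : PySem.Dict Int Int) (p : Int × Int) : PySem.Dict Int Int :=
  o.insert p.1 (o.getD p.1 0 + p.2)

-- the expanded (target, value) stream of A's loop
def pvExpand (ks : List Int) (f : Int → Int) : List (Int × Int) :=
  ks.flatMap (fun k => (pvTargets k).map (fun t => (t, f k)))

lemma pvStepA_eq (d : PySem.Dict Int Int) (out : PySem.Dict Int Int) (key : Int) :
    (if key = 0 then
      let out := if out.contains 7 then out.insert 7 (out.getD 7 0 + d.getD key 0)
                 else out.insert 7 (d.getD key 0)
      if out.contains 9 then out.insert 9 (out.getD 9 0 + d.getD key 0)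
      else out.insert 9 (d.getD key 0)
    else
      if out.contains key then out.insert key (out.getD key 0 + d.getD key 0)
      else out.insert key (d.getD key 0))
    = ((pvTargets key).map (fun t => (t, d.getD key 0))).foldl pvGStep out := by
  have hins : ∀ (o : PySem.Dict Int Int) (k v : Int),
      (if o.contains k then o.insert k (o.getD k 0 + v) else o.insert k v)
        = pvGStep o (k, v) := by
    intro o k v
    by_cases h : o.contains k
    · simp [pvGStep, h]
    · simp only [Bool.not_eq_true] at h
      have h0 : o.getD k 0 = 0 := PySem.Dict.getD_of_not_contains o 0 h
      simp [pvGStep, h, h0]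
  by_cases hk : key = 0
  · subst hk; simp [pvTargets, hins]
  · simp [pvTargets, hk, hins]

lemma pvFoldA_eq (d : PySem.Dict Int Int) (ks : List Int) (out : PySem.Dict Int Int) :
    ks.foldl (fun out key =>
      if key = 0 then
        let out := if out.contains 7 then out.insert 7 (out.getD 7 0 + d.getD key 0)
                   else out.insert 7 (d.getD key 0)
        if out.contains 9 then out.insert 9 (out.getD 9 0 + d.getD key 0)
        else out.insert 9 (d.getD key 0)
      else
        if out.contains key then out.insert key (out.getD key 0 + d.getD key 0)
        else out.insert key (d.getD key 0)) out
    = (pvExpand ks (fun k => d.getD k 0)).foldl pvGStep out := by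
  rw [pvExpand, List.foldl_flatMap]
  exact PySem.List.foldl_congr_mem _ _ _ _ (fun acc x _ => pvStepA_eq d acc x)

lemma pvGStep_keys (q : List (Int × Int)) (o : PySem.Dict Int Int) :
    (q.foldl pvGStep o).keys = PySem.Set.update o.keys (q.map (·.1)) := by
  simpa [pvGStep] using
    PySem.Dict.keys_foldl_insert_key (l := q) (key := (·.1))
      (f := fun o p => o.getD p.1 0 + p.2) (d := o)

lemma pvGStep_nodup (q : List (Int × Int)) (o : PySem.Dict Int Int) (h : o.keys.Nodup) :
    (q.foldl pvGStep o).keys.Nodup := by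
  simpa [pvGStep] using
    PySem.Dict.nodup_keys_foldl_insert_key q (·.1) (fun o p => o.getD p.1 0 + p.2) o h

lemma pvGStep_getD (q : List (Int × Int)) (o : PySem.Dict Int Int) (t : Int) :
    (q.foldl pvGStep o).getD t 0 = o.getD t 0 + ((q.filter (fun p => p.1 == t)).map (·.2)).sum := by
  induction q generalizing o with
  | nil => simp
  | cons p q ih =>
      simp only [List.foldl_cons, ih, pvGStep, List.filter_cons]
      by_cases h : p.1 = t
      · subst h; simp; ring
      · simp [PySem.Dict.getD_insert, h, Ne.symm h]

lemma pvExpand_keys (ks : List Int) (f : Int → Int) :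
    (pvExpand ks f).map (·.1) = ks.flatMap pvTargets := by
  simp [pvExpand, List.map_flatMap, Function.comp_def]

lemma pvHead_sum (k c t : Int) :
    ((((pvTargets k).map (fun t' => (t', c))).filter (fun p => p.1 == t)).map (·.2)).sum
      = if (pvTargets k).contains t then c else 0 := by
  by_cases hk : k = 0
  · by_cases h7 : (7 : Int) = t <;> by_cases h9 : (9 : Int) = t <;>
      simp [pvTargets, hk, h7, h9] <;> omega
  · by_cases ht : k = t
    · subst ht; simp [pvTargets, hk]
    · simp [pvTargets, hk, ht, Ne.symm ht]

lemma pvExpand_sum (ks : List Int) (f : Int → Int) (t : Int) :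
    (((pvExpand ks f).filter (fun p => p.1 == t)).map (·.2)).sum
      = ((ks.filter (fun k => (pvTargets k).contains t)).map f).sum := by
  induction ks with
  | nil => simp [pvExpand]
  | cons k ks ih =>
      simp only [pvExpand, List.flatMap_cons, List.filter_append, List.map_append,
        List.sum_append, List.filter_cons] at *
      rw [ih, pvHead_sum]
      by_cases hc : t ∈ pvTargets k <;> simp [hc]

lemma pvSeen_step (s : PySem.Set Int) (t : Int) :
    (if (PySem.Set.contains s t) then ((s : List Int), s)
     else ((s : List Int) ++ [t], PySem.Set.add s t)) = (PySem.Set.add s t, PySem.Set.add s t) := by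
  by_cases h : PySem.Set.contains s t <;> simp [PySem.Set.add, PySem.Set.contains] at * <;> simp [h]

lemma pvOrder_pair (xs : List Int) (s : PySem.Set Int) :
    xs.foldl (fun (os : List Int × PySem.Set Int) t =>
      if os.2.contains t then os else (os.1 ++ [t], PySem.Set.add os.2 t)) (s, s)
    = (PySem.Set.update s xs, PySem.Set.update s xs) := by
  induction xs generalizing s with
  | nil => simp [PySem.Set.update]
  | cons t xs ih =>
      rw [List.foldl_cons]
      have h := pvSeen_step s t
      simp only at h
      rw [h, ih]
      simp [PySem.Set.update]

lemma pvTargets_ne_zero {t k : Int} (h : t ∈ pvTargets k) : t ≠ 0 := by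
  unfold pvTargets at h
  by_cases hk : k = 0 <;> simp [hk] at h <;> omega

lemma pvSum_closed (ks : List Int) (f : Int → Int) (t : Int) (hnd : ks.Nodup) (ht : t ≠ 0) :
    ((ks.filter (fun k => (pvTargets k).contains t)).map f).sum
      = (if t ∈ ks then f t else 0) + (if 0 ∈ ks ∧ (t = 7 ∨ t = 9) then f 0 else 0) := by
  induction ks with
  | nil => simp
  | cons k ks ih =>
      obtain ⟨hk, hnd'⟩ := List.nodup_cons.mp hnd
      rw [List.filter_cons]
      by_cases hk0 : k = 0
      · subst hk0
        by_cases h79 : t = 7 ∨ t = 9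
        · have hc : (pvTargets 0).contains t = true := by
            rcases h79 with h | h <;> simp [pvTargets, h]
          rw [if_pos hc, List.map_cons, List.sum_cons, ih hnd']
          simp [ht, hk, h79]
          ring
        · have hmem : t ∉ pvTargets 0 := by
            simpa [pvTargets] using h79
          rw [if_neg (by simpa using hmem), ih hnd']
          simp [ht, h79]
      · by_cases hkt : k = t
        · subst hkt
          have hc : (pvTargets k).contains k = true := by simp [pvTargets, hk0]
          rw [if_pos hc, List.map_cons, List.sum_cons, ih hnd']
          simp [hk, Ne.symm hk0]
        · have hmem : t ∉ pvTargets k := by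
            simp only [pvTargets, if_neg hk0]
            simpa using fun h => hkt h.symm
          rw [if_neg (by simpa using hmem), ih hnd']
          simp [Ne.symm hkt, Ne.symm hk0]

lemma pvOrder_all (ks : List Int) :
    (ks.foldl (fun (os : List Int × PySem.Set Int) key =>
      (pvTargets key).foldl (fun (os : List Int × PySem.Set Int) t =>
        if os.2.contains t then os else (os.1 ++ [t], PySem.Set.add os.2 t)) os)
      ([], PySem.Set.empty)).1 = PySem.Set.ofList (ks.flatMap pvTargets) := by
  rw [← List.foldl_flatMap]
  rw [show (([], PySem.Set.empty) : List Int × PySem.Set Int)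
        = (([] : List Int), ([] : List Int)) from rfl]
  rw [pvOrder_pair]
  simp [PySem.Set.update, PySem.Set.ofList_eq_foldl]

-- ===== VERDICT (by name: the statement is the Claim_ definition above) =====
theorem child_spec : Claim_equal_child := by
  intro data _
  unfold Spec_child child child_alt
  set d := PySem.Dict.ofList data with hd
  have hnd : d.keys.Nodup := PySem.Dict.nodup_keys_ofList data
  simp only
  rw [pvFoldA_eq d d.keys PySem.Dict.empty, pvOrder_all]
  set q := pvExpand d.keys (fun k => d.getD k 0) with hq
  have hkeys : (q.foldl pvGStep PySem.Dict.empty).keys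
      = PySem.Set.ofList (d.keys.flatMap pvTargets) := by
    rw [pvGStep_keys]
    simp only [PySem.Dict.keys_empty]
    rw [hq, pvExpand_keys]
    simp [PySem.Set.update, PySem.Set.ofList_eq_foldl]
  have hnodup : (q.foldl pvGStep PySem.Dict.empty).keys.Nodup :=
    pvGStep_nodup q _ (by simp)
  rw [PySem.Dict.items_eq_map_keys _ hnodup 0, hkeys]
  refine List.map_congr_left ?_
  intro t htmem
  have ht0 : t ≠ 0 := by
    obtain ⟨k, _, hk⟩ :=
      List.mem_flatMap.mp ((PySem.Set.mem_ofList _ _).mp htmem)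
    exact pvTargets_ne_zero hk
  rw [pvGStep_getD, hq, pvExpand_sum, pvSum_closed d.keys _ t hnd ht0]
  simp only [PySem.Dict.getD_empty, zero_add]
  congr 1
  have hmem_getD : ∀ (x : Int), x ∉ d.keys → d.getD x 0 = 0 := by
    intro x hx
    refine PySem.Dict.getD_of_not_contains d 0 ?_
    rcases h : d.contains x with _ | _
    · rfl
    · exact absurd ((PySem.Dict.contains_iff_mem_keys d x).mp h) hx
  by_cases htk : t ∈ d.keys <;> by_cases h0k : (0 : Int) ∈ d.keys <;>
    by_cases h79 : t = 7 ∨ t = 9 <;>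
    simp [htk, h0k, h79, hmem_getD]
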